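-- pv_equiv track=rewrite | github.com/GinoBogo/gEttusSDR | gEttusSDR.py | cfg_writer
-- ===== SOURCE A (Python) =====
-- def cfg_writer(cfg):
--     items = [[K, V] for K, V in cfg.items()]
--     lines = []
--     title = ""
--     first = True
--     for item in items:
--         K, V = item
--         pos = K.rfind(".")
--         if pos > 0:
--             L = K[:pos]
--             R = K[pos + 1:]
--             if title != L:
--                 title = L
--                 if first:
--                     first = False
--                     lines.append(str.format("[{}]\n", title))
--                 else:
--                     lines.append(str.format("\n[{}]\n", title))
--             lines.append(str.format("{} = {}\n", R, V))
--     return lines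
-- ===== SOURCE B (Python) =====
-- def cfg_writer(cfg):
--     # Pass 1: keep only keys whose last '.' is at a position > 0, as
--     # (section, option, value) triples.
--     triples = []
--     for K, V in cfg.items():
--         p = K.rfind(".")
--         if p > 0:
--             triples.append((K[:p], K[p + 1:], V))
--     # Pass 2: walk consecutive runs of equal section names; each run gets
--     # one section header followed by its "option = value" lines.
--     lines = []
--     i = 0
--     n = len(triples)
--     first = True
--     while i < n:
--         sec = triples[i][0]
--         lines.append(("[{}]\n" if first else "\n[{}]\n").format(sec))
--         first = False
--         j = i
--         while j < n and triples[j][0] == sec: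
--             lines.append("{} = {}\n".format(triples[j][1], triples[j][2]))
--             j += 1
--         i = j
--     return lines
-- ===== Notes on version B (the rewrite author's own statement) =====
-- stated objective: alternative
-- what changed: A is one pass with title/first mutable flags deciding when a section header is due; B first builds a filtered list of (section, option, value) triples and then chunks it into consecutive runs of equal section names, emitting one header per run.
import Mathlib
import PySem

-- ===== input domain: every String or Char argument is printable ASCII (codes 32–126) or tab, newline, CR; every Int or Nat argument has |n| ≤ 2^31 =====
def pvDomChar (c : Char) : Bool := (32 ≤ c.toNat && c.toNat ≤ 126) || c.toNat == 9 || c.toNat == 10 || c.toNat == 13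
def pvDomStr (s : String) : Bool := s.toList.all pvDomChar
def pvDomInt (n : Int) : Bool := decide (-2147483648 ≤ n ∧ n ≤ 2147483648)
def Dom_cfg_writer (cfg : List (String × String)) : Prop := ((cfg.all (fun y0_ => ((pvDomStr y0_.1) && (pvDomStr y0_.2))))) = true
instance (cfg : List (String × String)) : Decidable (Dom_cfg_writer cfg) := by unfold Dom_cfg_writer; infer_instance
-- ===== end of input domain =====

-- B restructures A's single pass with title/first flags into: filter/map to
-- (section, option, value) triples, then chunk consecutive runs of equal
-- sections (one header per run).  Same output, same O(n) cost.

-- ===== PORT A =====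
-- A's loop body, over the dict items (cfg is a Python dict: PySem.Dict.ofList).
def aStep (s : List String × String × Bool) (item : String × String) :
    List String × String × Bool :=
  let (lines, title, first) := s
  let K := item.1
  let V := item.2
  let pos := PySem.Str.rfind K "."
  if 0 < pos then
    let L := PySem.Str.slice K none (some pos)
    let R := PySem.Str.slice K (some (pos + 1)) none
    if title ≠ L then
      if first then
        ((lines ++ ["[" ++ L ++ "]\n"]) ++ [R ++ " = " ++ V ++ "\n"], L, false)
      else
        ((lines ++ ["\n[" ++ L ++ "]\n"]) ++ [R ++ " = " ++ V ++ "\n"], L, first)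
    else
      (lines ++ [R ++ " = " ++ V ++ "\n"], title, first)
  else
    (lines, title, first)

def cfg_writer (cfg : List (String × String)) : List String :=
  (((PySem.Dict.ofList cfg).items).foldl aStep ([], "", true)).1

-- ===== PORT B =====
-- B pass 1: filtered (section, option, value) triples.
def bTriples (cfg : List (String × String)) : List (String × String × String) :=
  ((PySem.Dict.ofList cfg).items).foldl
    (fun acc kv =>
      let p := PySem.Str.rfind kv.1 "."
      if 0 < p then
        acc ++ [(PySem.Str.slice kv.1 none (some p),
                 PySem.Str.slice kv.1 (some (p + 1)) none, kv.2)]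
      else acc)
    []

-- B pass 2: one header per consecutive run of equal section names
-- (the inner while-scan over a run is the takeWhile/dropWhile split).
def bEmit : List (String × String × String) → Bool → List String
  | [], _ => []
  | (sec, suf, v) :: rest, first =>
    ((if first then "[" ++ sec ++ "]\n" else "\n[" ++ sec ++ "]\n")
      :: (suf ++ " = " ++ v ++ "\n")
      :: (rest.takeWhile (fun t => t.1 == sec)).map
           (fun t => t.2.1 ++ " = " ++ t.2.2 ++ "\n"))
    ++ bEmit (rest.dropWhile (fun t => t.1 == sec)) false
termination_by ts _ => ts.length
decreasing_by
  have := List.length_dropWhile_le (fun t => t.1 == sec) rest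
  simp; omega

def cfg_writer_alt (cfg : List (String × String)) : List String :=
  bEmit (bTriples cfg) true

-- ===== PRECONDITION & SPEC =====
def Spec_cfg_writer (cfg : List (String × String)) (out : List String) : Prop := out = cfg_writer_alt cfg
instance (cfg : List (String × String)) (out : List String) : Decidable (Spec_cfg_writer cfg out) := by unfold Spec_cfg_writer; infer_instance

-- ===== CLAIM (what is proved, stated in full; the proofs are below) =====
def Claim_equal_cfg_writer : Prop := ∀ (cfg : List (String × String)), Dom_cfg_writer cfg → Spec_cfg_writer cfg (cfg_writer cfg)

-- ===== LEMMAS AND PROOFS =====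

-- One filtered item of A's loop, as an Option.
def tripOf (kv : String × String) : Option (String × String × String) :=
  let p := PySem.Str.rfind kv.1 "."
  if 0 < p then
    some (PySem.Str.slice kv.1 none (some p),
          PySem.Str.slice kv.1 (some (p + 1)) none, kv.2)
  else none

-- A's loop on the filtered triples, lines factored out of the state.
def aCore : List (String × String × String) → String → Bool → List String
  | [], _, _ => []
  | (sec, suf, v) :: rest, title, first =>
    if title ≠ sec then
      (if first then "[" ++ sec ++ "]\n" else "\n[" ++ sec ++ "]\n")
        :: (suf ++ " = " ++ v ++ "\n") :: aCore rest sec false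
    else
      (suf ++ " = " ++ v ++ "\n") :: aCore rest title first

theorem bTriples_eq_filterMap (items : List (String × String))
    (acc : List (String × String × String)) :
    items.foldl
      (fun acc kv =>
        let p := PySem.Str.rfind kv.1 "."
        if 0 < p then
          acc ++ [(PySem.Str.slice kv.1 none (some p),
                   PySem.Str.slice kv.1 (some (p + 1)) none, kv.2)]
        else acc) acc
      = acc ++ items.filterMap tripOf := by
  induction items generalizing acc with
  | nil => simp
  | cons kv rest ih =>
    simp only [List.foldl_cons, List.filterMap_cons]
    unfold tripOf
    split_ifs with hp
    · rw [ih]; simp at hp; simp [tripOf, hp]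
    · rw [ih]; simp at hp; simp [tripOf, not_lt.mpr hp]


theorem aFold_eq_aCore (items : List (String × String))
    (lines : List String) (title : String) (first : Bool) :
    (items.foldl aStep (lines, title, first)).1
      = lines ++ aCore (items.filterMap tripOf) title first := by
  induction items generalizing lines title first with
  | nil => simp [aCore]
  | cons kv rest ih =>
    simp only [List.foldl_cons, List.filterMap_cons, aStep, tripOf]
    split_ifs with hp ht hf <;> rw [ih] <;> simp_all [aCore, tripOf]


-- the section name of a kept triple is nonempty
theorem tripOf_sec_ne_empty (kv : String × String) (t : String × String × String)
    (h : tripOf kv = some t) : t.1 ≠ "" := by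
  by_cases hp : 0 < PySem.Chars.rfind kv.1.toList ['.']
  · simp [tripOf, hp] at h
    subst h
    intro hemp
    have hemp' : PySem.Str.slice kv.1 none (some (PySem.Chars.rfind kv.1.toList ['.'])) = "" := hemp
    have hlist : (PySem.Str.slice kv.1 none (some (PySem.Chars.rfind kv.1.toList ['.']))).toList = [] := by
      rw [hemp']; rfl
    rw [PySem.Str.toList_slice, PySem.Chars.slice_eq_listSlice,
        PySem.List.slice_to _ (le_of_lt hp)] at hlist
    rcases List.take_eq_nil_iff.mp hlist with h4 | h4
    · omega
    · have hk : kv.1 = "" := String.toList_inj.mp (by simp [h4])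
      rw [hk] at hp
      exact absurd hp (by decide)
  · simp [tripOf, hp] at h

theorem head_dropWhile_false {α : Type} (p : α → Bool) (l : List α) (hd : α)
    (h : (l.dropWhile p).head? = some hd) : p hd = false := by
  induction l with
  | nil => simp at h
  | cons a t ih =>
    by_cases hp : p a
    · simpa [List.dropWhile_cons, hp] using ih (by simpa [List.dropWhile_cons, hp] using h)
    · simp [hp] at h; subst h; simpa using hp

theorem aCore_run (run rest : List (String × String × String)) (sec : String)
    (h : ∀ t ∈ run, t.1 = sec) :
    aCore (run ++ rest) sec false
      = run.map (fun t => t.2.1 ++ " = " ++ t.2.2 ++ "\n") ++ aCore rest sec false := by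
  induction run with
  | nil => simp
  | cons t r ih =>
    obtain ⟨s, suf, v⟩ := t
    have hs : s = sec := h _ List.mem_cons_self
    subst hs
    rw [List.cons_append]
    simp only [aCore, if_neg (by simp : ¬ (s ≠ s)), List.map_cons, List.cons_append]
    exact congrArg _ (ih fun t ht => h t (List.mem_cons_of_mem _ ht))

theorem aCore_eq_bEmit (n : Nat) (ts : List (String × String × String))
    (title : String) (first : Bool) (hn : ts.length ≤ n)
    (hhd : ∀ hd ∈ ts.head?, hd.1 ≠ title) :
    aCore ts title first = bEmit ts first := by
  induction n generalizing ts title first with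
  | zero =>
    have : ts = [] := List.length_eq_zero_iff.mp (Nat.le_zero.mp hn)
    subst this; simp [aCore, bEmit]
  | succ n ih =>
    cases ts with
    | nil => simp [aCore, bEmit]
    | cons t rest =>
      obtain ⟨sec, suf, v⟩ := t
      have hne : sec ≠ title := hhd (sec, suf, v) (by simp)
      have htw := List.takeWhile_append_dropWhile
        (p := fun (t : String × String × String) => t.1 == sec) (l := rest)
      simp only [aCore, if_pos (fun h => hne h.symm : title ≠ sec), bEmit]
      have hrun : aCore rest sec false
          = (rest.takeWhile (fun t => t.1 == sec)).map
              (fun t => t.2.1 ++ " = " ++ t.2.2 ++ "\n")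
            ++ aCore (rest.dropWhile (fun t => t.1 == sec)) sec false := by
        conv_lhs => rw [← htw]
        exact aCore_run _ _ _ (fun t ht => by
          have := List.mem_takeWhile_imp ht
          simpa using this)
      have hdrop : aCore (rest.dropWhile (fun t => t.1 == sec)) sec false
          = bEmit (rest.dropWhile (fun t => t.1 == sec)) false := by
        apply ih
        · have h1 := List.length_dropWhile_le (fun (t : String × String × String) => t.1 == sec) rest
          simp only [List.length_cons] at hn
          omega
        · intro hd hmem
          have := head_dropWhile_false _ rest hd (by simpa using hmem)
          simpa using this
      rw [hrun, hdrop]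
      simp

-- ===== VERDICT (by name: the statement is the Claim_ definition above) =====
theorem cfg_writer_spec : Claim_equal_cfg_writer := by
  intro cfg _
  unfold Spec_cfg_writer cfg_writer cfg_writer_alt bTriples
  rw [aFold_eq_aCore, bTriples_eq_filterMap]
  simp only [List.nil_append]
  apply aCore_eq_bEmit (((PySem.Dict.ofList cfg).items).filterMap tripOf).length _ _ _ le_rfl
  intro hd hmem
  have : hd ∈ ((PySem.Dict.ofList cfg).items).filterMap tripOf :=
    List.mem_of_mem_head? (by simpa using hmem)
  obtain ⟨kv, _, hkv⟩ := List.mem_filterMap.mp this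
  exact tripOf_sec_ne_empty kv hd hkv
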